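-- pv_equiv track=rewrite | github.com/AndzejK/crash_course_py | Functions/while_function.py | user_basic_info
-- ===== SOURCE A (Python) =====
-- def user_basic_info(name,surname,age=None):
--     user_info={"Name:":name.title(),"Surname":surname.title()}
--     if age:
--         user_info["Age"]=age
--     keys=[]
--     values=[]
--     for i in user_info:
--         keys.append(i)
--         values.append(user_info[i])
--     return values
-- ===== SOURCE B (Python) =====
-- def user_basic_info(name, surname, age=None):
--     # Declarative field table: each candidate field paired with its inclusion flag,
--     # then one filtering comprehension selects the values. No dict, no collection loop.
--     fields = [(True, name.title()), (True, surname.title()), (bool(age), age)]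
--     return [value for keep, value in fields if keep]
-- ===== Notes on version B (the rewrite author's own statement) =====
-- stated objective: simpler
-- what changed: Replaces the dict-build-then-iterate-and-collect algorithm with a declarative (flag, value) field table filtered by one comprehension; the dict, the discarded keys list and the collection loop disappear.
import Mathlib
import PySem

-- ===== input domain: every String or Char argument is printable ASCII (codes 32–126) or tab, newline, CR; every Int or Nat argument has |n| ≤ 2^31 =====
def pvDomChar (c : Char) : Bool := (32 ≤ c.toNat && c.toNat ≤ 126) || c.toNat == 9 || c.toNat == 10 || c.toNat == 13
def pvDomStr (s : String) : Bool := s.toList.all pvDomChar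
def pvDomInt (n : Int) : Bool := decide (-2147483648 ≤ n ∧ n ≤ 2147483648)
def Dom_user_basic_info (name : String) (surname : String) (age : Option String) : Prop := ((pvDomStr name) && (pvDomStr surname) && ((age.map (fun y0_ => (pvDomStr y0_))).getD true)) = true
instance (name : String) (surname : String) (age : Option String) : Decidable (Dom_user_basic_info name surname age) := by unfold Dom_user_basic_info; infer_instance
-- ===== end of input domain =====

-- B replaces the dict-build-then-collect loop with a (flag, value) field table and one filter pass (objective: simpler).

-- str.title(), exact on the ASCII domain: a letter is uppercased after a non-letter, lowercased after a letter
def pyTitleAux (prevAlpha : Bool) : List Char → List Char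
  | [] => []
  | c :: rest =>
      (if prevAlpha then c.toLower else c.toUpper) :: pyTitleAux c.isAlpha rest

def pyTitle (s : String) : String := String.ofList (pyTitleAux false s.toList)

-- ===== PORT A =====
def user_basic_info (name : String) (surname : String) (age : Option String) : List String :=
  let user_info : PySem.Dict String String :=
    ((PySem.Dict.empty.insert "Name:" (pyTitle name)).insert "Surname" (pyTitle surname))
  let user_info :=
    match age with
    | some a => if a ≠ "" then user_info.insert "Age" a else user_info  -- `if age:` truthiness
    | none => user_info
  -- the for-loop collecting keys and values (user_info[i] on a key of the dict: getD never hits the default)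
  let kv := user_info.keys.foldl
    (fun (kv : List String × List String) i => (kv.1 ++ [i], kv.2 ++ [user_info.getD i ""]))
    ([], [])
  kv.2

-- ===== PORT B =====
-- bool(age): none → false, "" → false; the stored value age.getD "" is only emitted when the flag is true
def user_basic_info_alt (name : String) (surname : String) (age : Option String) : List String :=
  let fields : List (Bool × String) :=
    [(true, pyTitle name), (true, pyTitle surname),
     ((match age with | none => false | some a => a ≠ ""), age.getD "")]
  fields.filterMap (fun kv => if kv.1 then some kv.2 else none)

-- ===== PRECONDITION & SPEC =====
def Spec_user_basic_info (name : String) (surname : String) (age : Option String) (out : List String) : Prop := out = user_basic_info_alt name surname age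
instance (name : String) (surname : String) (age : Option String) (out : List String) : Decidable (Spec_user_basic_info name surname age out) := by unfold Spec_user_basic_info; infer_instance

-- ===== CLAIM =====
def Claim_equal_user_basic_info : Prop := ∀ (name : String) (surname : String) (age : Option String), Dom_user_basic_info name surname age → Spec_user_basic_info name surname age (user_basic_info name surname age)

-- ===== LEMMAS AND PROOFS =====

-- ===== VERDICT =====
theorem user_basic_info_spec : Claim_equal_user_basic_info := by
  intro name surname age _
  unfold Spec_user_basic_info user_basic_info user_basic_info_alt
  cases age with
  | none => simp [PySem.Dict.empty, PySem.Dict.insert, PySem.Dict.keys, PySem.Dict.getD, PySem.Dict.get?]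
  | some a =>
    by_cases h : a = ""
    · simp [h, PySem.Dict.empty, PySem.Dict.insert, PySem.Dict.keys, PySem.Dict.getD, PySem.Dict.get?]
    · simp [h, PySem.Dict.empty, PySem.Dict.insert, PySem.Dict.keys, PySem.Dict.getD, PySem.Dict.get?]
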